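-- pv_equiv track=rewrite | github.com/fl-sean03/molecular-topology-toolkit | tools/mdf_parser/mdf_parser.py | extract_unique_charge_groups
-- ===== SOURCE A (Python) =====
-- from typing import Dict, List, Union
--
-- def extract_unique_charge_groups(atoms_data: Dict) -> Dict[str, List[str]]:
--     """Extract unique force field types (charge groups) and their atom identifiers"""
--     charge_group_to_atoms = {}
--     for atom_id, info in atoms_data.items():
--         charge_group = info["charge_group"]
--         if charge_group not in charge_group_to_atoms:
--             charge_group_to_atoms[charge_group] = []
--         charge_group_to_atoms[charge_group].append(atom_id)
--     return charge_group_to_atoms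
-- ===== SOURCE B (Python) =====
-- def extract_unique_charge_groups(atoms_data):
--     """Extract unique force field types (charge groups) and their atom identifiers"""
--     groups = list(dict.fromkeys(info["charge_group"] for info in atoms_data.values()))
--     return {g: [atom_id for atom_id, info in atoms_data.items()
--                 if info["charge_group"] == g]
--             for g in groups}
-- ===== Notes on version B (the rewrite author's own statement) =====
-- stated objective: alternative
-- what changed: Replaces A's single-pass dict accumulation (append to a per-key bucket) by a two-pass decomposition: first the ordered dedup of charge groups, then one filtering comprehension per group.
import Mathlib
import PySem

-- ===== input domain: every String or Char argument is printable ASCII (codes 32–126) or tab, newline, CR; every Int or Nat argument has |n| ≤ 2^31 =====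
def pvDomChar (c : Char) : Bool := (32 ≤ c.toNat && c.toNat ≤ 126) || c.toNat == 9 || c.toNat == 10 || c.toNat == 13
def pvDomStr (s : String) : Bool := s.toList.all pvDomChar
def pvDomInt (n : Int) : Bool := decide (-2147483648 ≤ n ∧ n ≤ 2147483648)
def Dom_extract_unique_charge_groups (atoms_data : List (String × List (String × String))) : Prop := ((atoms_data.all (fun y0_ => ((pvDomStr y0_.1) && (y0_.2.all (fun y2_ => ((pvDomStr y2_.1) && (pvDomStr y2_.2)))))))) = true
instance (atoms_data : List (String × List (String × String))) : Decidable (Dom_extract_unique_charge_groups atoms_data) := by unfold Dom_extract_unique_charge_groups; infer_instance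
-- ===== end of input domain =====

-- B replaces A's single-pass hash accumulation by a two-pass decomposition: first the ordered
-- deduplicated list of charge groups, then one filtering scan per group (objective: alternative;
-- same return value, not claimed faster).

-- info["charge_group"] (first-match lookup in the info association list); shared field accessor
def pvChargeGroup (info : List (String × String)) : String :=
  (PySem.Dict.mk info).getD "charge_group" ""

-- ===== PORT A =====
def extract_unique_charge_groups (atoms_data : List (String × List (String × String))) : List (String × List String) :=
  (atoms_data.foldl (fun d p =>
      let charge_group := pvChargeGroup p.2
      let d' := if d.contains charge_group then d else d.insert charge_group []
      d'.modify charge_group [] (fun xs => xs ++ [p.1]))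
    PySem.Dict.empty).items

-- ===== PORT B =====
def extract_unique_charge_groups_alt (atoms_data : List (String × List (String × String))) : List (String × List String) :=
  let groups := PySem.List.dedup (atoms_data.map (fun p => pvChargeGroup p.2))
  groups.map (fun g =>
    (g, (atoms_data.filter (fun p => pvChargeGroup p.2 == g)).map (fun p => p.1)))

-- ===== PRECONDITION & SPEC =====
-- Pre_ excludes exactly the inputs where some atom's info dict lacks the key "charge_group":
-- there the Python A raises KeyError.
def Pre_extract_unique_charge_groups (atoms_data : List (String × List (String × String))) : Prop :=
  ∀ p ∈ atoms_data, (PySem.Dict.mk p.2).contains "charge_group" = true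
instance (atoms_data : List (String × List (String × String))) : Decidable (Pre_extract_unique_charge_groups atoms_data) := by unfold Pre_extract_unique_charge_groups; infer_instance

def pvWitness_extract_unique_charge_groups : (List (String × List (String × String))) :=
  [("a1", [("charge_group", "C1")]), ("a2", [("charge_group", "C2"), ("x", "y")]), ("a3", [("charge_group", "C1")])]

def Spec_extract_unique_charge_groups (atoms_data : List (String × List (String × String))) (out : List (String × List String)) : Prop := out = extract_unique_charge_groups_alt atoms_data
instance (atoms_data : List (String × List (String × String))) (out : List (String × List String)) : Decidable (Spec_extract_unique_charge_groups atoms_data out) := by unfold Spec_extract_unique_charge_groups; infer_instance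

-- ===== CLAIM (what is proved, stated in full; the proofs are below) =====
def Claim_equal_extract_unique_charge_groups : Prop := ∀ (atoms_data : List (String × List (String × String))), Dom_extract_unique_charge_groups atoms_data → Pre_extract_unique_charge_groups atoms_data → Spec_extract_unique_charge_groups atoms_data (extract_unique_charge_groups atoms_data)

-- ===== LEMMAS AND PROOFS =====

-- A's loop body ('if cg not in d: d[cg] = []' then append) is one modify-with-default step.
theorem step_eq_modify (d : PySem.Dict String (List String)) (cg v : String) :
    (if d.contains cg then d else d.insert cg []).modify cg [] (fun xs => xs ++ [v])
      = d.modify cg [] (fun xs => xs ++ [v]) := by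
  by_cases h : d.contains cg
  · simp [h]
  · simp [h, PySem.Dict.modify, PySem.Dict.insert_insert_self, PySem.Dict.getD_insert_self,
      PySem.Dict.getD_of_not_contains _ _ (by simpa using h)]

-- ===== VERDICT (by name: the statement is the Claim_ definition above) =====
theorem extract_unique_charge_groups_spec : Claim_equal_extract_unique_charge_groups := by
  intro atoms_data _ _
  unfold Spec_extract_unique_charge_groups extract_unique_charge_groups extract_unique_charge_groups_alt
  -- rewrite A's fold into the canonical modify-fold over (charge_group, atom_id) pairs
  have hfold :
      atoms_data.foldl (fun d p =>
          let charge_group := pvChargeGroup p.2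
          let d' := if d.contains charge_group then d else d.insert charge_group []
          d'.modify charge_group [] (fun xs => xs ++ [p.1])) PySem.Dict.empty
        = (atoms_data.map (fun p => (pvChargeGroup p.2, p.1))).foldl
            (fun d q => d.modify q.1 [] (fun xs => xs ++ [q.2])) PySem.Dict.empty := by
    rw [List.foldl_map]
    apply List.foldl_ext
    intro d p _
    exact step_eq_modify d (pvChargeGroup p.2) p.1
  rw [hfold]
  set l := atoms_data.map (fun p => (pvChargeGroup p.2, p.1)) with hl
  have hnd : ((l.foldl (fun d q => d.modify q.1 [] (fun xs => xs ++ [q.2])) PySem.Dict.empty).keys).Nodup := by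
    exact PySem.Dict.nodup_keys_foldl_modify_key l Prod.fst [] (fun _ q => (· ++ [q.2])) _
      (by simp [PySem.Dict.keys_empty])
  rw [PySem.Dict.items_eq_map_keys _ hnd []]
  rw [PySem.Dict.keys_foldl_modify_key]
  simp only [PySem.Dict.getD_foldl_modify_append, PySem.Dict.getD_empty, PySem.Dict.keys_empty]
  rw [hl]
  simp [PySem.Set.update, PySem.Set.ofList, List.filter_map, Function.comp_def, List.map_map]
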